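-- pv_equiv track=rewrite | github.com/vamsidhar486/python-practice | DSAlgorithmsPractice/ArrayProblems/easy/DistinctObsoluteValues.py | get_obsolute
-- ===== SOURCE A (Python) =====
-- def get_obsolute(arr):
--     d = {}
--     count = 0
--     for i in range(len(arr)):
--         if arr[i] >= 0 and arr[i] not in d:
--             d[arr[i]] = 1
--             count += 1
--     return count
-- ===== SOURCE B (Python) =====
-- def get_obsolute(arr):
--     vals = sorted(x for x in arr if x >= 0)
--     count = 0
--     prev = None
--     for x in vals:
--         if prev is None or x != prev:
--             count += 1
--         prev = x
--     return count
-- ===== Notes on version B (the rewrite author's own statement) =====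
-- stated objective: alternative
-- what changed: Replaces the dict-membership first-occurrence counting loop by filtering the non-negatives, sorting them (without mutating arr), and counting adjacent changes in one scan over the sorted list.
import Mathlib
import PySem

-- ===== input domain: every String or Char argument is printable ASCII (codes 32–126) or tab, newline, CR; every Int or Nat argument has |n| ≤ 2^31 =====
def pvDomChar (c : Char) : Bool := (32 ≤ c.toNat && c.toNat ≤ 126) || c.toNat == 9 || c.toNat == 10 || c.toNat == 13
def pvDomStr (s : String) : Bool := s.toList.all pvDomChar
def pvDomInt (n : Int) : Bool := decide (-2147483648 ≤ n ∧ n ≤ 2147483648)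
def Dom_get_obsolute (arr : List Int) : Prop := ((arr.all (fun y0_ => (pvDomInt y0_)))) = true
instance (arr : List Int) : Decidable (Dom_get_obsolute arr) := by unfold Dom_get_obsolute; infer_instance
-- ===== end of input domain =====

-- B counts distinct non-negative values by sorting a filtered copy and counting adjacent
-- changes, instead of A's dict-membership loop; alternative decomposition, same results.

-- ===== PORT A =====
-- A's loop body: if arr[i] >= 0 and arr[i] not in d: d[arr[i]] = 1; count += 1
def pvStepA (st : PySem.Dict Int Int × Int) (x : Int) : PySem.Dict Int Int × Int :=
  if 0 ≤ x ∧ st.1.contains x = false then (st.1.insert x 1, st.2 + 1) else st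

def get_obsolute (arr : List Int) : Int :=
  ((PySem.List.pyRange 0 (PySem.List.len arr) 1).foldl
    (fun st i => pvStepA st (PySem.List.pyGetD arr i 0))
    ((PySem.Dict.empty : PySem.Dict Int Int), (0 : Int))).2

-- ===== PORT B =====
-- B's loop body: if prev is None or x != prev: count += 1; prev = x
def pvStepB (st : Int × Option Int) (x : Int) : Int × Option Int :=
  (match st.2 with
   | none => st.1 + 1
   | some p => if x ≠ p then st.1 + 1 else st.1,
   some x)

def get_obsolute_alt (arr : List Int) : Int :=
  let vals := PySem.List.sorted (arr.filter (fun x => decide (0 ≤ x))) (fun x => x) false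
  (vals.foldl pvStepB ((0 : Int), (none : Option Int))).1

-- ===== PRECONDITION & SPEC =====
def Spec_get_obsolute (arr : List Int) (out : Int) : Prop := out = get_obsolute_alt arr
instance (arr : List Int) (out : Int) : Decidable (Spec_get_obsolute arr out) := by unfold Spec_get_obsolute; infer_instance

-- ===== CLAIM (what is proved, stated in full; the proofs are below) =====
def Claim_equal_get_obsolute : Prop := ∀ (arr : List Int), Dom_get_obsolute arr → Spec_get_obsolute arr (get_obsolute arr)

-- ===== LEMMAS AND PROOFS =====

-- A-side invariant: count tracks the cardinality of the dict's key set.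
lemma loopA (l : List Int) (d : PySem.Dict Int Int) (c : Int)
    (hc : c = (d.keys.toFinset.card : Int)) :
    (l.foldl pvStepA (d, c)).2
      = ((d.keys.toFinset ∪ (l.filter (fun x => decide (0 ≤ x))).toFinset).card : Int) := by
  induction l generalizing d c with
  | nil => simpa using hc
  | cons x t ih =>
    simp only [List.foldl_cons, pvStepA]
    by_cases hx : 0 ≤ x
    · by_cases hm : d.contains x = false
      · have hxmem : x ∉ d.keys := by
          intro h
          have := (PySem.Dict.contains_iff_mem_keys d x).2 h
          rw [hm] at this; exact Bool.noConfusion this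
        have hkeys : (d.insert x 1).keys = d.keys ++ [x] :=
          PySem.Dict.keys_insert_of_not_contains d 1 hm
        rw [if_pos ⟨hx, hm⟩]
        have := ih (d.insert x 1) (c + 1)
          (by
            rw [hkeys]
            have : (d.keys ++ [x]).toFinset = insert x d.keys.toFinset := by
              simp [List.toFinset_append, Finset.union_comm]
            rw [this, Finset.card_insert_of_notMem (by simpa using hxmem)]
            push_cast; omega)
        rw [this, hkeys]
        have h1 : (d.keys ++ [x]).toFinset = insert x d.keys.toFinset := by
          simp [List.toFinset_append, Finset.union_comm]
        have h2 : (List.filter (fun x => decide (0 ≤ x)) (x :: t)) =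
            x :: List.filter (fun x => decide (0 ≤ x)) t := by
          simp [hx]
        rw [h1, h2]
        congr 2
        simp [List.toFinset_cons, Finset.insert_union, Finset.union_insert]
      · have hm' : d.contains x = true := by
          cases h : d.contains x with
          | false => exact absurd h hm
          | true => rfl
        have hxmem : x ∈ d.keys := (PySem.Dict.contains_iff_mem_keys d x).1 hm'
        rw [if_neg (by rintro ⟨_, h⟩; rw [hm'] at h; exact Bool.noConfusion h)]
        rw [ih d c hc]
        have h2 : (List.filter (fun x => decide (0 ≤ x)) (x :: t)) =
            x :: List.filter (fun x => decide (0 ≤ x)) t := by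
          simp [hx]
        rw [h2]
        congr 2
        rw [List.toFinset_cons, Finset.union_insert]
        exact (Finset.insert_eq_self.2 (Finset.mem_union_left _ (by simpa using hxmem))).symm
    · rw [if_neg (by rintro ⟨h, _⟩; exact hx h)]
      rw [ih d c hc]
      congr 2
      simp [hx]

-- B-side invariant, prev = some p and p is a lower bound of the remaining sorted list.
lemma loopB_some (l : List Int) (c p : Int) (hs : l.Pairwise (· ≤ ·)) (hp : ∀ y ∈ l, p ≤ y) :
    (l.foldl pvStepB (c, some p)).1 = c + ((l.toFinset.erase p).card : Int) := by
  induction l generalizing c p with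
  | nil => simp
  | cons x t ih =>
    have hxt : ∀ y ∈ t, x ≤ y := List.pairwise_cons.1 hs |>.1
    have hst : t.Pairwise (· ≤ ·) := List.pairwise_cons.1 hs |>.2
    have hpx : p ≤ x := hp x (List.mem_cons_self)
    simp only [List.foldl_cons, pvStepB]
    by_cases hxp : x = p
    · subst hxp
      rw [if_neg (by simp)]
      rw [ih c x hst hxt]
      congr 2
      rw [List.toFinset_cons, Finset.erase_insert_eq_erase]
    · rw [if_pos hxp]
      have hpt : p ∉ t.toFinset := by
        simp only [List.mem_toFinset]
        intro h
        have := hxt p h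
        omega
      rw [ih (c + 1) x hst hxt]
      have h1 : (x :: t).toFinset.erase p = insert x t.toFinset := by
        rw [List.toFinset_cons, Finset.erase_insert_of_ne hxp,
          Finset.erase_eq_of_notMem hpt]
      rw [h1]
      have h2 : insert x t.toFinset = insert x (t.toFinset.erase x) := by
        ext y; simp; tauto
      rw [h2, Finset.card_insert_of_notMem (Finset.notMem_erase _ _)]
      push_cast; omega

lemma loopB_start (l : List Int) (hs : l.Pairwise (· ≤ ·)) :
    (l.foldl pvStepB (0, none)).1 = (l.toFinset.card : Int) := by
  cases l with
  | nil => simp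
  | cons x t =>
    have hxt : ∀ y ∈ t, x ≤ y := List.pairwise_cons.1 hs |>.1
    have hst : t.Pairwise (· ≤ ·) := List.pairwise_cons.1 hs |>.2
    simp only [List.foldl_cons, pvStepB]
    rw [loopB_some t (0 + 1) x hst hxt]
    rw [List.toFinset_cons]
    have h2 : insert x t.toFinset = insert x (t.toFinset.erase x) := by
      ext y; simp; tauto
    rw [h2, Finset.card_insert_of_notMem (Finset.notMem_erase _ _)]
    push_cast; omega

lemma altCard (arr : List Int) :
    get_obsolute_alt arr = (((arr.filter (fun x => decide (0 ≤ x))).toFinset).card : Int) := by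
  unfold get_obsolute_alt
  have hperm : (PySem.List.sorted (arr.filter (fun x => decide (0 ≤ x))) (fun x => x) false).Perm
      (arr.filter (fun x => decide (0 ≤ x))) := PySem.List.sorted_perm _ _ _
  have hpw : (PySem.List.sorted (arr.filter (fun x => decide (0 ≤ x))) (fun x => x) false).Pairwise
      (fun a b => (fun x => x) a ≤ (fun x => x) b) := PySem.List.sorted_pairwise _ _
  rw [loopB_start _ (by simpa using hpw), List.toFinset_eq_of_perm _ _ hperm]

-- ===== VERDICT (by name: the statement is the Claim_ definition above) =====
theorem get_obsolute_spec : Claim_equal_get_obsolute := by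
  intro arr _
  unfold Spec_get_obsolute
  unfold get_obsolute
  rw [PySem.List.foldl_pyRange_zero_pyGetD arr 0 pvStepA (PySem.Dict.empty, 0)]
  rw [loopA arr PySem.Dict.empty 0 (by simp [PySem.Dict.keys_empty])]
  rw [altCard]
  simp [PySem.Dict.keys_empty]
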